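-- pv_equiv track=rewrite | github.com/ryanso128/CSCI-1100 | Dropbox_cs1100_hw/Homework 5/hw5_part2.py | global_max
-- ===== SOURCE A (Python) =====
-- def global_max(x):
--     c=[]
--     g=[]
--
--     i=0
--     for a in x:
--         for b in a:
--             c.append(b)
--     d=max(sorted(c))
--     for e in x:
--         h=0
--         for f in e:
--             if f==d:
--                 g.append(i)
--                 g.append(h)
--                 break
--             h+=1
--         i+=1
--     return d, g
-- ===== SOURCE B (Python) =====
-- def global_max(x):
--     best = None
--     positions = []
--     for r, row in enumerate(x):
--         if not row:
--             continue
--         m = max(row)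
--         if best is None or m > best:
--             best = m
--             positions = [r, row.index(m)]
--         elif m == best:
--             positions += [r, row.index(m)]
--     if best is None:
--         raise ValueError("max() arg is an empty sequence")
--     return best, positions
-- ===== Notes on version B (the rewrite author's own statement) =====
-- stated objective: faster
-- what changed: Single pass over enumerated rows keeping a running global max and position list (reset on a new max, extend on a tie), instead of flattening everything, sorting the flattened list, and rescanning every row with a manual counter.
import Mathlib
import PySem

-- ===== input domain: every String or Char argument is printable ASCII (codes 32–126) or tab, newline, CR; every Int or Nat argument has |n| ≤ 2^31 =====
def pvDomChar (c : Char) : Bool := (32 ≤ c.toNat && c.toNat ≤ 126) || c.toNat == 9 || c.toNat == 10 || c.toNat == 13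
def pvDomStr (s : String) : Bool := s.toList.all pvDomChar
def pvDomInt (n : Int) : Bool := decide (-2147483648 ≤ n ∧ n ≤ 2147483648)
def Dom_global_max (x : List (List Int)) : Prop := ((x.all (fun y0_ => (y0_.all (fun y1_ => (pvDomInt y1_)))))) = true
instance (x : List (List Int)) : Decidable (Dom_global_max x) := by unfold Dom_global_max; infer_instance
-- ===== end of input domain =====

-- B is a single pass keeping a running max and position list, replacing A's flatten+sort+rescan; return values only (no mutation).

-- ===== PORT A =====
-- inner 'for f in e: if f==d: append(i); append(h); break; h+=1'
def pvRowLoop (d : Int) (i : Int) (g : List Int) : List Int → Int → List Int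
  | [], _ => g
  | f :: rest, h => if f = d then g ++ [i, h] else pvRowLoop d i g rest (h + 1)

def global_max (x : List (List Int)) : Int × List Int :=
  let c := x.foldl (fun c a => a.foldl (fun c b => c ++ [b]) c) []
  match PySem.List.max? (PySem.List.sorted c (fun y => y) false) (fun y => y) with
  | none => (0, [])   -- Python raises ValueError here; excluded by Pre_global_max
  | some d =>
    let st := x.foldl (fun (st : List Int × Int) e => (pvRowLoop d st.2 st.1 e 0, st.2 + 1)) ([], (0 : Int))
    (d, st.1)

-- ===== PORT B =====
def pvStep (st : Option Int × List Int) (p : Int × List Int) : Option Int × List Int :=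
  if p.2 = [] then st
  else
    match PySem.List.max? p.2 (fun y => y) with
    | none => st   -- unreachable: p.2 ≠ []
    | some m =>
      let j : Int := ((PySem.List.index? p.2 m).getD 0 : Nat)
      match st.1 with
      | none => (some m, [p.1, j])
      | some best =>
        if m > best then (some m, [p.1, j])
        else if m = best then (some m, st.2 ++ [p.1, j])
        else st

def global_max_alt (x : List (List Int)) : Int × List Int :=
  let st := (PySem.List.enumerate x).foldl pvStep (none, [])
  match st.1 with
  | none => (0, [])   -- Python raises ValueError here; excluded by Pre_global_max
  | some b => (b, st.2)

-- ===== PRECONDITION & SPEC =====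
-- Pre_ excludes grids with no element at all (all rows empty), where both Pythons raise ValueError (max of an empty sequence).
def Pre_global_max (x : List (List Int)) : Prop := x.flatten ≠ []
instance (x : List (List Int)) : Decidable (Pre_global_max x) := by unfold Pre_global_max; infer_instance
def pvWitness_global_max : List (List Int) := [[1]]

def Spec_global_max (x : List (List Int)) (out : Int × List Int) : Prop := out = global_max_alt x
instance (x : List (List Int)) (out : Int × List Int) : Decidable (Spec_global_max x out) := by unfold Spec_global_max; infer_instance

-- ===== CLAIM (what is proved, stated in full; the proofs are below) =====
def Claim_equal_global_max : Prop := ∀ (x : List (List Int)), Dom_global_max x → Pre_global_max x → Spec_global_max x (global_max x)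

-- ===== LEMMAS AND PROOFS =====

-- canonical position list: one [row, first-col] pair per row containing d, rows numbered from i
def pvPosFrom (d : Int) (i : Int) : List (List Int) → List Int
  | [] => []
  | e :: rest =>
    (match PySem.List.index? e d with
     | some j => [i, (j : Int)]
     | none => []) ++ pvPosFrom d (i + 1) rest

theorem pvPosFrom_append (d i : Int) (x y : List (List Int)) :
    pvPosFrom d i (x ++ y) = pvPosFrom d i x ++ pvPosFrom d (i + x.length) y := by
  induction x generalizing i with
  | nil => simp [pvPosFrom]
  | cons e rest ih =>
    simp only [List.cons_append, pvPosFrom, ih (i + 1), List.append_assoc, List.length_cons]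
    congr 2
    push_cast
    ring_nf

theorem pvPosFrom_nil_of_not_mem (d i : Int) (x : List (List Int))
    (h : ∀ e ∈ x, d ∉ e) : pvPosFrom d i x = [] := by
  induction x generalizing i with
  | nil => rfl
  | cons e rest ih =>
    have he : PySem.List.index? e d = none :=
      (PySem.List.index?_eq_none_iff e d).mpr (h e (by simp))
    simp only [pvPosFrom]
    rw [he, ih (i + 1) (fun e' h' => h e' (by simp [h']))]
    rfl

-- value of max? id is determined by membership
theorem pvMax_eq_of_mem_iff (l l' : List Int) (h : ∀ a : Int, a ∈ l ↔ a ∈ l') :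
    PySem.List.max? l (fun y => y) = PySem.List.max? l' (fun y => y) := by
  cases h1 : PySem.List.max? l (fun y => y) with
  | none =>
    cases h2 : PySem.List.max? l' (fun y => y) with
    | none => rfl
    | some m' =>
      have hmem := PySem.List.max?_mem h2
      have hl : l = [] := (PySem.List.max?_eq_none_iff l _).mp h1
      exact absurd ((h m').mpr hmem) (by simp [hl])
  | some m =>
    cases h2 : PySem.List.max? l' (fun y => y) with
    | none =>
      have hmem := PySem.List.max?_mem h1
      have hl : l' = [] := (PySem.List.max?_eq_none_iff l' _).mp h2
      exact absurd ((h m).mp hmem) (by simp [hl])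
    | some m' =>
      have hm : m ∈ l' := (h m).mp (PySem.List.max?_mem h1)
      have hm' : m' ∈ l := (h m').mpr (PySem.List.max?_mem h2)
      have h3 := PySem.List.max?_isMax h2 m hm
      have h4 := PySem.List.max?_isMax h1 m' hm'
      simp only [Option.some_inj]
      omega

theorem pvMax_eq_some_iff (l : List Int) (m : Int) :
    PySem.List.max? l (fun y => y) = some m ↔ m ∈ l ∧ ∀ y ∈ l, y ≤ m := by
  constructor
  · intro h
    exact ⟨PySem.List.max?_mem h, fun y hy => PySem.List.max?_isMax h y hy⟩
  · rintro ⟨hm, hb⟩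
    cases h1 : PySem.List.max? l (fun y => y) with
    | none =>
      have := (PySem.List.max?_eq_none_iff l _).mp h1
      simp [this] at hm
    | some m' =>
      have h2 := PySem.List.max?_mem h1
      have h3 := PySem.List.max?_isMax h1 m hm
      have h4 := hb m' h2
      simp only [Option.some_inj]
      omega

-- ===== A side =====

theorem pvFlatten_loop (x : List (List Int)) (acc : List Int) :
    x.foldl (fun c a => a.foldl (fun c b => c ++ [b]) c) acc = acc ++ x.flatten := by
  induction x generalizing acc with
  | nil => simp
  | cons e rest ih =>
    rw [List.foldl_cons, PySem.List.foldl_append_singleton_eq_self, ih, List.flatten_cons,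
      List.append_assoc]

theorem pvRowLoop_eq (d i : Int) (g : List Int) (e : List Int) (h : Int) :
    pvRowLoop d i g e h =
      g ++ (match PySem.List.index? e d with
            | some j => [i, h + (j : Int)]
            | none => []) := by
  induction e generalizing g h with
  | nil =>
    have hnone : PySem.List.index? ([] : List Int) d = none :=
      (PySem.List.index?_eq_none_iff [] d).mpr (by simp)
    rw [hnone]
    simp [pvRowLoop]
  | cons f rest ih =>
    by_cases hf : f = d
    · subst hf
      rw [PySem.List.index?_cons_self]
      simp [pvRowLoop]
    · rw [PySem.List.index?_cons_of_ne rest hf]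
      simp only [pvRowLoop, if_neg hf, ih]
      cases hj : PySem.List.index? rest d with
      | none => simp
      | some j =>
        simp only [Option.map_some]
        congr 2
        push_cast
        ring_nf

theorem pvAFold_eq (d : Int) (x : List (List Int)) (g : List Int) (i : Int) :
    x.foldl (fun (st : List Int × Int) e => (pvRowLoop d st.2 st.1 e 0, st.2 + 1)) (g, i) =
      (g ++ pvPosFrom d i x, i + x.length) := by
  induction x generalizing g i with
  | nil => simp [pvPosFrom]
  | cons e rest ih =>
    rw [List.foldl_cons, ih]
    rw [pvRowLoop_eq]
    simp only [pvPosFrom, List.length_cons, Prod.mk.injEq]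
    constructor
    · cases hj : PySem.List.index? e d with
      | none => simp
      | some j => simp
    · push_cast; omega

-- ===== B side =====

def pvCState (x : List (List Int)) : Option Int × List Int :=
  match PySem.List.max? x.flatten (fun y => y) with
  | none => (none, [])
  | some d => (some d, pvPosFrom d 0 x)

theorem pvStep_canonical (x : List (List Int)) (e : List Int) :
    pvStep (pvCState x) ((x.length : Int), e) = pvCState (x ++ [e]) := by
  have hflat : (x ++ [e]).flatten = x.flatten ++ e := by simp
  by_cases he : e = []
  · subst he
    have h1 : pvStep (pvCState x) ((x.length : Int), []) = pvCState x := by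
      simp [pvStep]
    rw [h1]
    unfold pvCState
    rw [hflat]
    simp only [List.append_nil]
    cases hd : PySem.List.max? x.flatten (fun y => y) with
    | none => rfl
    | some d =>
      have hnone : PySem.List.index? ([] : List Int) d = none :=
        (PySem.List.index?_eq_none_iff [] d).mpr (by simp)
      simp [pvPosFrom_append, pvPosFrom]
  · obtain ⟨m, hm⟩ : ∃ m, PySem.List.max? e (fun y => y) = some m := by
      cases hm : PySem.List.max? e (fun y => y) with
      | none => exact absurd ((PySem.List.max?_eq_none_iff e _).mp hm) he
      | some m => exact ⟨m, rfl⟩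
    have hmmem : m ∈ e := PySem.List.max?_mem hm
    have hmmax : ∀ y ∈ e, y ≤ m := fun y hy => PySem.List.max?_isMax hm y hy
    obtain ⟨j, hj⟩ : ∃ j, PySem.List.index? e m = some j := by
      cases hj : PySem.List.index? e m with
      | none => exact absurd ((PySem.List.index?_eq_none_iff e m).mp hj) (by simp [hmmem])
      | some j => exact ⟨j, rfl⟩
    rw [PySem.List.index?_eq_idxOf?] at hj
    cases hd : PySem.List.max? x.flatten (fun y => y) with
    | none =>
      have hfl : x.flatten = [] := (PySem.List.max?_eq_none_iff x.flatten _).mp hd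
      have hcx : pvCState x = (none, []) := by unfold pvCState; rw [hd]
      have hnew : PySem.List.max? (x ++ [e]).flatten (fun y => y) = some m := by
        rw [hflat, hfl, List.nil_append]; exact hm
      have hcx' : pvCState (x ++ [e]) = (some m, pvPosFrom m 0 (x ++ [e])) := by
        unfold pvCState; rw [hnew]
      have hstep : pvStep (none, []) ((x.length : Int), e) =
          (some m, [(x.length : Int), (j : Int)]) := by
        simp [pvStep, he, hm, hj]
      rw [hcx, hcx', hstep]
      have hrows : ∀ r ∈ x, m ∉ r := by
        intro r hr hmr
        have : m ∈ x.flatten := List.mem_flatten.mpr ⟨r, hr, hmr⟩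
        simp [hfl] at this
      rw [pvPosFrom_append, pvPosFrom_nil_of_not_mem m 0 x hrows]
      simp [pvPosFrom, hj]
    | some best =>
      have hbmem : best ∈ x.flatten := PySem.List.max?_mem hd
      have hbmax : ∀ y ∈ x.flatten, y ≤ best := fun y hy => PySem.List.max?_isMax hd y hy
      have hcx : pvCState x = (some best, pvPosFrom best 0 x) := by unfold pvCState; rw [hd]
      rw [hcx]
      by_cases hgt : m > best
      · have hnew : PySem.List.max? (x ++ [e]).flatten (fun y => y) = some m := by
          rw [hflat, pvMax_eq_some_iff]
          refine ⟨List.mem_append.mpr (Or.inr hmmem), fun y hy => ?_⟩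
          rcases List.mem_append.mp hy with h1 | h1
          · exact le_trans (hbmax y h1) (le_of_lt hgt)
          · exact hmmax y h1
        have hcx' : pvCState (x ++ [e]) = (some m, pvPosFrom m 0 (x ++ [e])) := by
          unfold pvCState; rw [hnew]
        have hstep : pvStep (some best, pvPosFrom best 0 x) ((x.length : Int), e) =
            (some m, [(x.length : Int), (j : Int)]) := by
          simp [pvStep, he, hm, hj, hgt]
        rw [hcx', hstep]
        have hrows : ∀ r ∈ x, m ∉ r := by
          intro r hr hmr
          have : m ∈ x.flatten := List.mem_flatten.mpr ⟨r, hr, hmr⟩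
          exact absurd (hbmax m this) (by omega)
        rw [pvPosFrom_append, pvPosFrom_nil_of_not_mem m 0 x hrows]
        simp [pvPosFrom, hj]
      · have hnew : PySem.List.max? (x ++ [e]).flatten (fun y => y) = some best := by
          rw [hflat, pvMax_eq_some_iff]
          refine ⟨List.mem_append.mpr (Or.inl hbmem), fun y hy => ?_⟩
          rcases List.mem_append.mp hy with h1 | h1
          · exact hbmax y h1
          · exact le_trans (hmmax y h1) (by omega)
        have hcx' : pvCState (x ++ [e]) = (some best, pvPosFrom best 0 (x ++ [e])) := by
          unfold pvCState; rw [hnew]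
        rw [hcx']
        by_cases heq : m = best
        · subst heq
          have hstep : pvStep (some m, pvPosFrom m 0 x) ((x.length : Int), e) =
              (some m, pvPosFrom m 0 x ++ [(x.length : Int), (j : Int)]) := by
            simp [pvStep, he, hm, hj]
          rw [hstep, pvPosFrom_append]
          simp [pvPosFrom, hj]
        · have hstep : pvStep (some best, pvPosFrom best 0 x) ((x.length : Int), e) =
              (some best, pvPosFrom best 0 x) := by
            simp [pvStep, he, hm, hgt, heq]
          rw [hstep]
          have hne : PySem.List.index? e best = none := by
            refine (PySem.List.index?_eq_none_iff e best).mpr ?_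
            intro hbe
            exact heq (le_antisymm (by omega) (hmmax best hbe))
          rw [PySem.List.index?_eq_idxOf?] at hne
          rw [pvPosFrom_append]
          simp [pvPosFrom, hne]

theorem pvBFold_eq (x : List (List Int)) :
    (PySem.List.enumerate x).foldl pvStep (none, []) = pvCState x := by
  induction x using List.reverseRecOn with
  | nil => simp [PySem.List.enumerate_nil, pvCState, PySem.List.max?]
  | append_singleton xs e ih =>
    rw [PySem.List.enumerate_append, List.foldl_append, ih]
    simp only [PySem.List.enumerate_cons, PySem.List.enumerate_nil, List.foldl_cons,
      List.foldl_nil]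
    simpa using pvStep_canonical xs e

-- ===== VERDICT (by name: the statement is the Claim_ definition above) =====
theorem global_max_spec : Claim_equal_global_max := by
  intro x _ hpre
  obtain ⟨d, hd⟩ : ∃ d, PySem.List.max? x.flatten (fun y => y) = some d := by
    cases hd : PySem.List.max? x.flatten (fun y => y) with
    | none => exact absurd ((PySem.List.max?_eq_none_iff x.flatten _).mp hd) hpre
    | some d => exact ⟨d, rfl⟩
  have hperm : PySem.List.max? (PySem.List.sorted x.flatten (fun y => y) false) (fun y => y) =
      some d := by
    rw [pvMax_eq_of_mem_iff _ x.flatten (fun a => PySem.List.mem_sorted _ _ _ a)]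
    exact hd
  have hcx : pvCState x = (some d, pvPosFrom d 0 x) := by unfold pvCState; rw [hd]
  simp only [Spec_global_max, global_max, global_max_alt]
  rw [pvBFold_eq, pvFlatten_loop, List.nil_append, hperm, hcx]
  simp [pvAFold_eq]
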